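-- pv_equiv track=rewrite | github.com/Mirko2612/Programacion-2 | PRACTICA_4.py | apariciones
-- ===== SOURCE A (Python) =====
-- def apariciones(l,e):
--     x=0
--     for j in l:
--         if j == e:
--             x+=1
--
--     pos=l.index(e)
--     list1=[]
--     for i in range(len(l)):
--         if l[i]==e:
--             list1.append(i)
--
--     return x,pos,list1
-- ===== SOURCE B (Python) =====
-- def apariciones(l, e):
--     positions = [i for i, v in enumerate(l) if v == e]
--     return len(positions), positions[0], positions
-- ===== Notes on version B (the rewrite author's own statement) =====
-- stated objective: simpler
-- what changed: One enumerate pass collects all matching indices; count and first index are derived from that list instead of a separate counting loop and a separate l.index scan.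
import Mathlib
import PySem

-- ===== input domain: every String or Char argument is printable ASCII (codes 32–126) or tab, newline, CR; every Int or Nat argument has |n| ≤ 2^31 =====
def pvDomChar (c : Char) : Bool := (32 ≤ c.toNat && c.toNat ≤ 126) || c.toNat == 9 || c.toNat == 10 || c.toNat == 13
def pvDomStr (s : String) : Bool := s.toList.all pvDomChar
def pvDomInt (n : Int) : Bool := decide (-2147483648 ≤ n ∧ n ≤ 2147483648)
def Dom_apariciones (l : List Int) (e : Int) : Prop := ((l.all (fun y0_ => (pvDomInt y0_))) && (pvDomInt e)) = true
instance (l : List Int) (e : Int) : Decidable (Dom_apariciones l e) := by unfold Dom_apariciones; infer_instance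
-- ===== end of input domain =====

-- B makes one enumerate pass collecting the matching indices and derives the count and the
-- first index from that list (objective: simpler — one pass instead of three).

-- ===== PORT A =====
def apariciones (l : List Int) (e : Int) : Int × Int × List Int :=
  let x : Int := l.foldl (fun x j => if j == e then x + 1 else x) 0
  let pos : Int := (((PySem.List.index? l e).getD 0 : Nat) : Int)
  let list1 : List Int := (PySem.List.pyRange 0 (l.length : Int) 1).foldl
      (fun acc i => if PySem.List.pyGetD l i 0 == e then acc ++ [i] else acc) []
  (x, pos, list1)

-- ===== PORT B =====
def apariciones_alt (l : List Int) (e : Int) : Int × Int × List Int :=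
  let positions : List Int :=
    ((PySem.List.enumerate l 0).filter (fun p => p.2 == e)).map (fun p => p.1)
  ((positions.length : Int), (PySem.List.pyGet? positions 0).getD 0, positions)

-- ===== PRECONDITION & SPEC =====
-- Python A raises ValueError at l.index(e) when e is absent from l (B raises IndexError there).
def Pre_apariciones (l : List Int) (e : Int) : Prop := e ∈ l
instance (l : List Int) (e : Int) : Decidable (Pre_apariciones l e) := by unfold Pre_apariciones; infer_instance
def pvWitness_apariciones : List Int × Int := ([1, 2, 1], 1)

def Spec_apariciones (l : List Int) (e : Int) (out : Int × Int × List Int) : Prop := out = apariciones_alt l e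
instance (l : List Int) (e : Int) (out : Int × Int × List Int) : Decidable (Spec_apariciones l e out) := by unfold Spec_apariciones; infer_instance

-- ===== CLAIM (what is proved, stated in full; the proofs are below) =====
def Claim_equal_apariciones : Prop := ∀ (l : List Int) (e : Int), Dom_apariciones l e → Pre_apariciones l e → Spec_apariciones l e (apariciones l e)

-- ===== LEMMAS AND PROOFS =====

/-- The (Nat) indices of the occurrences of `e` in `l`, in order. -/
def mi : List Int → Int → List Nat
  | [], _ => []
  | x :: xs, e => (if x == e then [0] else []) ++ (mi xs e).map (· + 1)

lemma mi_length (l : List Int) (e : Int) : (mi l e).length = l.countP (· == e) := by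
  induction l with
  | nil => simp [mi]
  | cons x xs ih =>
    by_cases h : x == e <;> simp [mi, h, ih]

lemma mi_head (l : List Int) (e : Int) : (mi l e).head? = PySem.List.index? l e := by
  induction l with
  | nil => simp [mi, PySem.List.index?_eq_idxOf?]
  | cons x xs ih =>
    by_cases h : x == e
    · have hx : x = e := by simpa using h
      subst hx
      rw [PySem.List.index?_cons_self]
      simp [mi]
    · have hx : x ≠ e := by simpa using h
      rw [PySem.List.index?_cons_of_ne _ hx, ← ih]
      simp [mi, h, List.head?_map]

lemma map_shift (t : List Nat) (s : Int) :
    (t.map (· + 1)).map (fun k : Nat => s + (k : Int)) = t.map (fun k : Nat => (s + 1) + (k : Int)) := by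
  rw [List.map_map]
  exact List.map_congr_left (fun a _ => by simp [Function.comp]; omega)

lemma enum_mi (l : List Int) (e : Int) : ∀ s : Int,
    ((PySem.List.enumerate l s).filter (fun p => p.2 == e)).map (fun p => p.1)
      = (mi l e).map (fun k : Nat => s + (k : Int)) := by
  induction l with
  | nil => intro s; simp [mi, PySem.List.enumerate_nil]
  | cons x xs ih =>
    intro s
    rw [PySem.List.enumerate_cons, List.filter_cons]
    by_cases h : x == e <;>
      simp only [mi, h, if_pos, if_neg, Bool.false_eq_true, not_false_iff,
        List.singleton_append, List.nil_append, List.map_cons, ih (s + 1), map_shift]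
    simp

lemma range_mi (l : List Int) (e : Int) :
    (List.range l.length).filter (fun k => l.getD k 0 == e) = mi l e := by
  induction l with
  | nil => simp [mi]
  | cons x xs ih =>
    rw [List.length_cons, List.range_succ_eq_map]
    by_cases h : x == e <;>
      simp [mi, h, List.filter_map, Function.comp_def, ← ih, Nat.succ_eq_add_one]

theorem apariciones_spec : Claim_equal_apariciones := by
  intro l e _ hpre
  unfold Spec_apariciones apariciones apariciones_alt
  rw [PySem.List.foldl_if_add_one, PySem.List.pyRange_one, PySem.List.foldl_append_if_eq_filter,
    List.filter_map, enum_mi l e 0]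
  have hpred : ((fun i => PySem.List.pyGetD l i 0 == e) ∘ fun k : Nat => (0 : Int) + ↑k)
      = fun k : Nat => l.getD k 0 == e := by
    funext k; simp [Function.comp]
  have hrange : ((l.length : Int) - 0).toNat = l.length := by omega
  obtain ⟨n, hn⟩ : ∃ n, PySem.List.index? l e = some n :=
    Option.isSome_iff_exists.mp ((PySem.List.index?_isSome_iff l e).mpr hpre)
  have hhead : (mi l e).head? = some n := by rw [mi_head, hn]
  obtain ⟨t, ht⟩ : ∃ t, mi l e = n :: t := by
    cases hmi : mi l e with
    | nil => rw [hmi] at hhead; simp at hhead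
    | cons a u =>
      rw [hmi] at hhead
      simp at hhead
      exact ⟨u, by rw [hhead]⟩
  have hcnt : (n :: t).length = l.countP (· == e) := by rw [← ht]; exact mi_length l e
  rw [hpred, hrange, range_mi l e, hn, ht]
  simp only [Option.getD_some, List.nil_append, List.map_cons, List.length_cons,
    List.length_map]
  refine Prod.ext ?_ (Prod.ext ?_ rfl)
  · simp only [List.length_cons] at hcnt
    simp only []
    push_cast [← hcnt]
    ring
  · simp [PySem.List.pyGet?, PySem.List.pyIdx?]
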